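-- pv_equiv track=rewrite | github.com/park-jongbeom/ga-api-platform | .github/scripts/jira-transition-epics-done-if-children-done.py | expand_backlog_children_to_jira_keys
-- ===== SOURCE A (Python) =====
-- from typing import Dict, List, Set
--
-- def expand_backlog_children_to_jira_keys(
--     child_keys: List[str], jira_to_backlog: Dict[str, str]
-- ) -> Set[str]:
--     """백로그 기준 자식 키 목록을 실제 JIRA에서 사용할 이슈 키 집합으로 변환."""
--     backlog_to_jira: Dict[str, List[str]] = {}
--     for jira_key, backlog_key in jira_to_backlog.items():
--         backlog_to_jira.setdefault(backlog_key, []).append(jira_key)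
--     result: Set[str] = set()
--     for c in child_keys:
--         result.add(c)
--         result.update(backlog_to_jira.get(c, []))
--     return result
-- ===== SOURCE B (Python) =====
-- def expand_backlog_children_to_jira_keys(child_keys, jira_to_backlog):
--     """Set of child keys plus, per child, the jira keys mapping to it --
--     one flattened comprehension over the mapping, no inverted index."""
--     return set(
--         k
--         for c in child_keys
--         for k in [c] + [j for j, b in jira_to_backlog.items() if b == c]
--     )
-- ===== Notes on version B (the rewrite author's own statement) =====
-- stated objective: simpler
-- what changed: Replaced A's two-phase design (build an inverted backlog->jira multimap dict, then loop over children updating a mutable set) by a single flattened comprehension that emits each child followed by the jira keys mapping to it and passes it to set() once; no inverted index and no mutable accumulators.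
import Mathlib
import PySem

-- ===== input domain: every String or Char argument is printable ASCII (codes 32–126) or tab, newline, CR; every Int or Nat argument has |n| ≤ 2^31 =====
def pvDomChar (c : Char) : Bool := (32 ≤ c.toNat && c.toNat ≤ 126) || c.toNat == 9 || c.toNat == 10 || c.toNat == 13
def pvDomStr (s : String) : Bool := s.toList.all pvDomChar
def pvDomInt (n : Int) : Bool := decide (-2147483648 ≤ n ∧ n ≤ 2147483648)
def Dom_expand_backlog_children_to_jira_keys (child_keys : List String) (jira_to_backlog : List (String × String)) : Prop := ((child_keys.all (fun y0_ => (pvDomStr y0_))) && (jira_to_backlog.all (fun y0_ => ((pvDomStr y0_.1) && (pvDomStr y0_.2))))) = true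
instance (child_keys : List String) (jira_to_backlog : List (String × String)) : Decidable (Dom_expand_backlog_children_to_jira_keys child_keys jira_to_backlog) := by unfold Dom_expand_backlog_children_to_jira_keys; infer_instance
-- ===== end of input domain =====

-- B: one flattened comprehension fed to set(), instead of A's inverted-index dict plus a mutable-set loop (objective: simpler).
-- ===== PORT A =====
-- backlog_to_jira.setdefault(backlog_key, []).append(jira_key)  =  d.modify backlog_key [] (· ++ [jira_key])
def expand_backlog_children_to_jira_keys (child_keys : List String) (jira_to_backlog : List (String × String)) : List String :=
  let backlog_to_jira : PySem.Dict String (List String) :=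
    jira_to_backlog.foldl (fun d p => d.modify p.2 [] (· ++ [p.1])) PySem.Dict.empty
  child_keys.foldl
    (fun result c => PySem.Set.update (PySem.Set.add result c) (backlog_to_jira.getD c []))
    PySem.Set.empty

-- ===== PORT B =====
def expand_backlog_children_to_jira_keys_alt (child_keys : List String) (jira_to_backlog : List (String × String)) : List String :=
  PySem.Set.ofList
    (child_keys.flatMap (fun c => c :: (jira_to_backlog.filter (fun p => p.2 == c)).map Prod.fst))

-- ===== PRECONDITION & SPEC =====
def Spec_expand_backlog_children_to_jira_keys (child_keys : List String) (jira_to_backlog : List (String × String)) (out : List String) : Prop := out = expand_backlog_children_to_jira_keys_alt child_keys jira_to_backlog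
instance (child_keys : List String) (jira_to_backlog : List (String × String)) (out : List String) : Decidable (Spec_expand_backlog_children_to_jira_keys child_keys jira_to_backlog out) := by unfold Spec_expand_backlog_children_to_jira_keys; infer_instance

-- ===== CLAIM (what is proved, stated in full; the proofs are below) =====
def Claim_equal_expand_backlog_children_to_jira_keys : Prop := ∀ (child_keys : List String) (jira_to_backlog : List (String × String)), Dom_expand_backlog_children_to_jira_keys child_keys jira_to_backlog → Spec_expand_backlog_children_to_jira_keys child_keys jira_to_backlog (expand_backlog_children_to_jira_keys child_keys jira_to_backlog)

-- ===== LEMMAS AND PROOFS =====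

-- getD on the inverted-index dict built by A's first loop: the jira keys whose backlog value is c, in order.
theorem pv_getD_invIndex (l : List (String × String)) (d : PySem.Dict String (List String)) (c : String) :
    (l.foldl (fun d p => d.modify p.2 [] (· ++ [p.1])) d).getD c []
      = d.getD c [] ++ (l.filter (fun p => p.2 == c)).map Prod.fst := by
  induction l generalizing d with
  | nil => simp
  | cons p t ih =>
      simp only [List.foldl_cons, List.filter_cons, ih, PySem.Dict.getD_modify]
      by_cases h : c = p.2
      · subst h; simp
      · rw [if_neg h, if_neg (fun hh => h (eq_of_beq hh).symm)]

-- A's second loop as a fold of Set.add over the flattened sequence.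
theorem pv_foldl_add_update (ck : List String) (g : String → List String) (s : PySem.Set String) :
    ck.foldl (fun r c => PySem.Set.update (PySem.Set.add r c) (g c)) s
      = (ck.flatMap (fun c => c :: g c)).foldl PySem.Set.add s := by
  induction ck generalizing s with
  | nil => simp
  | cons c t ih =>
      rw [List.foldl_cons, ih, List.flatMap_cons, List.foldl_append, List.foldl_cons]
      rfl


-- ===== VERDICT (by name: the statement is the Claim_ definition above) =====
theorem expand_backlog_children_to_jira_keys_spec : Claim_equal_expand_backlog_children_to_jira_keys := by
  intro ck jtb _
  unfold Spec_expand_backlog_children_to_jira_keys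
  unfold expand_backlog_children_to_jira_keys expand_backlog_children_to_jira_keys_alt
  simp only [pv_getD_invIndex, PySem.Dict.getD_empty, List.nil_append]
  rw [PySem.Set.ofList_eq_foldl, ← pv_foldl_add_update]
  rfl
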